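-- pv_equiv track=rewrite | github.com/shaharharel/edit-chem | scripts/download/prepare_skempi2_antibodies.py | identify_heavy_light_chains
-- ===== SOURCE A (Python) =====
-- from typing import Dict, Optional, Tuple
--
-- def identify_heavy_light_chains(chains: Dict[str, str], pdb_chain_str: str) -> Tuple[str, str, str, str]:
--     """
--     Identify heavy and light chain sequences.
--
--     Args:
--         chains: Dict mapping chain ID to sequence
--         pdb_chain_str: PDB ID with chain info (e.g., "1AHW_AB_C" where AB is antibody, C is antigen)
--
--     Returns:
--         (heavy_chain_id, heavy_seq, light_chain_id, light_seq)
--     """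
--     parts = pdb_chain_str.split('_')
--     if len(parts) < 2:
--         return '', '', '', ''
--
--     pdb_id = parts[0]
--     ab_chains = parts[1] if len(parts) > 1 else ''
--
--     # Antibody chains are typically listed first
--     heavy_id = ''
--     heavy_seq = ''
--     light_id = ''
--     light_seq = ''
--
--     # Try to identify H/L chains from chain letters
--     for i, chain_letter in enumerate(ab_chains):
--         if chain_letter not in chains:
--             continue
--
--         seq = chains[chain_letter]
--
--         # Heuristic: Heavy chains are usually longer
--         if not heavy_seq or len(seq) > len(heavy_seq):
--             if heavy_seq:
--                 # Previous heavy becomes light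
--                 light_id = heavy_id
--                 light_seq = heavy_seq
--             heavy_id = chain_letter
--             heavy_seq = seq
--         elif not light_seq or len(seq) > len(light_seq):
--             light_id = chain_letter
--             light_seq = seq
--
--     return heavy_id, heavy_seq, light_id, light_seq
-- ===== SOURCE B (Python) =====
-- def identify_heavy_light_chains(chains, pdb_chain_str):
--     """Sort-then-slice: rank candidate chains by sequence length (stable, descending)
--     and take the top two as (heavy, light)."""
--     parts = pdb_chain_str.split('_')
--     if len(parts) < 2:
--         return '', '', '', ''
--     pairs = [(c, chains[c]) for c in parts[1] if c in chains]
--     ranked = sorted(pairs, key=lambda p: len(p[1]), reverse=True)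
--     heavy = ranked[0] if len(ranked) > 0 else ('', '')
--     light = ranked[1] if len(ranked) > 1 else ('', '')
--     return heavy[0], heavy[1], light[0], light[1]
-- ===== Notes on version B (the rewrite author's own statement) =====
-- stated objective: simpler
-- what changed: Replaces A's interleaved promote/demote single-pass scan with building the (letter, seq) candidate list and stable-sorting it by sequence length descending, returning the first two entries.
-- outside the precondition, e.g. on identify_heavy_light_chains({'A': '', 'B': 'X'}, '1AHW_AB'): A returns ('B', 'X', '', ''), B returns ('B', 'X', 'A', '')
import Mathlib
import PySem

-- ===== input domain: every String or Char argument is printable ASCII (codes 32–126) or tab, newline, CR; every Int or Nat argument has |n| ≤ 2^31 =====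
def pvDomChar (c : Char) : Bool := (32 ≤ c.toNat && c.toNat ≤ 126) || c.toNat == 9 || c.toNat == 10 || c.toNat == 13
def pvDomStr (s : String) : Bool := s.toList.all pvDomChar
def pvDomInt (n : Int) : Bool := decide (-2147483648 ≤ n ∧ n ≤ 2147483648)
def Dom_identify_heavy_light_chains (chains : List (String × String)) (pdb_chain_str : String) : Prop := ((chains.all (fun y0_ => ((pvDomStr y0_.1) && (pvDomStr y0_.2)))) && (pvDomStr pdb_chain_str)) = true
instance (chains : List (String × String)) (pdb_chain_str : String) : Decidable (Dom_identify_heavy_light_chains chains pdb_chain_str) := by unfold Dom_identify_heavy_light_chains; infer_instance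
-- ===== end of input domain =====

-- B replaces A's interleaved promote/demote single-pass scan by a sort-then-slice:
-- collect the candidate (letter, seq) pairs, stable-sort them by sequence length
-- descending, and return the first two entries (objective: simpler).

-- ===== PORT A =====
def identify_heavy_light_chains (chains : List (String × String)) (pdb_chain_str : String) : String × String × String × String :=
  match PySem.Str.split? pdb_chain_str "_" with
  | none => ("", "", "", "")   -- unreachable: the separator "_" is nonempty
  | some parts =>
    if parts.length < 2 then ("", "", "", "")
    else
      let ab_chains := PySem.List.pyGetD parts 1 ""
      ab_chains.toList.foldl (fun st chain_letter =>
        match PySem.Dict.get? ⟨chains⟩ (String.ofList [chain_letter]) with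
        | none => st        -- 'if chain_letter not in chains: continue'
        | some seq =>
          let (heavy_id, heavy_seq, light_id, light_seq) := st
          if heavy_seq = "" ∨ PySem.Str.len heavy_seq < PySem.Str.len seq then
            if heavy_seq = "" then
              (String.ofList [chain_letter], seq, light_id, light_seq)
            else
              -- previous heavy becomes light
              (String.ofList [chain_letter], seq, heavy_id, heavy_seq)
          else if light_seq = "" ∨ PySem.Str.len light_seq < PySem.Str.len seq then
            (heavy_id, heavy_seq, String.ofList [chain_letter], seq)
          else st) ("", "", "", "")

-- ===== PORT B =====
def identify_heavy_light_chains_alt (chains : List (String × String)) (pdb_chain_str : String) : String × String × String × String :=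
  match PySem.Str.split? pdb_chain_str "_" with
  | none => ("", "", "", "")   -- unreachable: the separator "_" is nonempty
  | some parts =>
    if parts.length < 2 then ("", "", "", "")
    else
      let ab := PySem.List.pyGetD parts 1 ""
      let pairs := ab.toList.filterMap (fun c =>
        (PySem.Dict.get? ⟨chains⟩ (String.ofList [c])).map (fun s => (String.ofList [c], s)))
      let ranked := PySem.List.sorted pairs (fun p => PySem.Str.len p.2) true
      let heavy := ranked.getD 0 ("", "")
      let light := ranked.getD 1 ("", "")
      (heavy.1, heavy.2, light.1, light.2)

-- ===== PRECONDITION & SPEC =====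
-- Pre_ excludes inputs where a selected antibody chain letter maps to the EMPTY
-- sequence: there A's truthiness tests ('if not heavy_seq') conflate 'no chain seen
-- yet' with 'a chain whose sequence is empty', so A silently drops such a chain or
-- keeps the last rather than the first empty light — an accidental corner where B's
-- stable top-2 choice is as defensible as A's.
def Pre_identify_heavy_light_chains (chains : List (String × String)) (pdb_chain_str : String) : Prop :=
  ((PySem.Str.split? pdb_chain_str "_").getD []).length < 2 ∨
    ((PySem.List.pyGetD ((PySem.Str.split? pdb_chain_str "_").getD []) 1 "").toList.all
      (fun c => PySem.Dict.get? (⟨chains⟩ : PySem.Dict String String) (String.ofList [c]) != some "")) = true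
instance (chains : List (String × String)) (pdb_chain_str : String) : Decidable (Pre_identify_heavy_light_chains chains pdb_chain_str) := by unfold Pre_identify_heavy_light_chains; infer_instance

def pvWitness_identify_heavy_light_chains : (List (String × String)) × String :=
  ([("H", "ab"), ("L", "c")], "x_HL")

def Spec_identify_heavy_light_chains (chains : List (String × String)) (pdb_chain_str : String) (out : String × String × String × String) : Prop := out = identify_heavy_light_chains_alt chains pdb_chain_str
instance (chains : List (String × String)) (pdb_chain_str : String) (out : String × String × String × String) : Decidable (Spec_identify_heavy_light_chains chains pdb_chain_str out) := by unfold Spec_identify_heavy_light_chains; infer_instance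

-- ===== CLAIM (what is proved, stated in full; the proofs are below) =====
def Claim_equal_identify_heavy_light_chains : Prop := ∀ (chains : List (String × String)) (pdb_chain_str : String), Dom_identify_heavy_light_chains chains pdb_chain_str → Pre_identify_heavy_light_chains chains pdb_chain_str → Spec_identify_heavy_light_chains chains pdb_chain_str (identify_heavy_light_chains chains pdb_chain_str)

-- ===== LEMMAS AND PROOFS =====

-- A's loop body applied to an already-looked-up (letter, sequence) pair
def pvStepA (st : String × String × String × String) (p : String × String) : String × String × String × String :=
  if st.2.1 = "" ∨ PySem.Str.len st.2.1 < PySem.Str.len p.2 then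
    if st.2.1 = "" then (p.1, p.2, st.2.2.1, st.2.2.2)
    else (p.1, p.2, st.1, st.2.1)
  else if st.2.2.2 = "" ∨ PySem.Str.len st.2.2.2 < PySem.Str.len p.2 then
    (st.1, st.2.1, p.1, p.2)
  else st

-- first two entries of a list, padded with ""
def pvPack : List (String × String) → String × String × String × String
  | [] => ("", "", "", "")
  | [a] => (a.1, a.2, "", "")
  | a :: b :: _ => (a.1, a.2, b.1, b.2)

-- the definitional cons equation of insertBy (rfl; stated for rewriting)
theorem pvInsertBy_cons {α : Type} (before : α → α → Bool) (x y : α) (ys : List α) :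
    PySem.List.insertBy before x (y :: ys) =
      if before x y then x :: y :: ys else y :: PySem.List.insertBy before x ys := rfl

theorem pvPack_eq_getD (l : List (String × String)) :
    pvPack l = ((l.getD 0 ("", "")).1, (l.getD 0 ("", "")).2,
                (l.getD 1 ("", "")).1, (l.getD 1 ("", "")).2) := by
  match l with
  | [] => rfl
  | [a] => rfl
  | a :: b :: t => rfl

theorem pvStepA_insert (l : List (String × String)) (p : String × String)
    (hmem : ∀ q ∈ l, q.2 ≠ "") :
    pvPack (PySem.List.insertBy
      (fun a b => decide (PySem.Str.len b.2 < PySem.Str.len a.2)) p l) =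
    pvStepA (pvPack l) p := by
  match l with
  | [] =>
    simp [PySem.List.insertBy, pvPack, pvStepA]
  | [a] =>
    have ha2 := hmem a (by simp)
    by_cases hcmp : a.2.length < p.2.length
    · rw [pvInsertBy_cons, if_pos (by simp [hcmp])]
      simp [pvPack, pvStepA, ha2, hcmp]
    · rw [pvInsertBy_cons, if_neg (by simp [hcmp])]
      simp [pvPack, pvStepA, PySem.List.insertBy, ha2, hcmp]
  | a :: b :: t =>
    have ha2 := hmem a (by simp)
    have hb2 := hmem b (by simp)
    by_cases h1 : a.2.length < p.2.length
    · rw [pvInsertBy_cons, if_pos (by simp [h1])]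
      simp [pvPack, pvStepA, ha2, h1]
    · rw [pvInsertBy_cons, if_neg (by simp [h1])]
      by_cases h2 : b.2.length < p.2.length
      · rw [pvInsertBy_cons, if_pos (by simp [h2])]
        simp [pvPack, pvStepA, ha2, hb2, h1, h2]
      · rw [pvInsertBy_cons, if_neg (by simp [h2])]
        have hpk : pvPack (a :: b :: PySem.List.insertBy
            (fun a b => decide (PySem.Str.len b.2 < PySem.Str.len a.2)) p t) =
            (a.1, a.2, b.1, b.2) := rfl
        rw [hpk]
        simp [pvPack, pvStepA, ha2, hb2, h1, h2]

theorem pvFold_eq_pack_sorted (ps : List (String × String))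
    (h : ∀ q ∈ ps, q.2 ≠ "") :
    ps.foldl pvStepA ("", "", "", "") =
      pvPack (PySem.List.sorted ps (fun p => PySem.Str.len p.2) true) := by
  induction ps using List.reverseRecOn with
  | nil => rfl
  | append_singleton qs p ih =>
    rw [List.foldl_append, List.foldl_cons, List.foldl_nil,
      ih (fun q hq => h q (by simp [hq])),
      PySem.List.sorted_rev_eq_foldl_insertBy (qs ++ [p]),
      List.foldl_append, List.foldl_cons, List.foldl_nil,
      ← PySem.List.sorted_rev_eq_foldl_insertBy qs]
    exact (pvStepA_insert _ p
      (fun q hq => h q (by simp [(PySem.List.mem_sorted qs _ true q).mp hq]))).symm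

-- ===== VERDICT (by name: the statement is the Claim_ definition above) =====
theorem identify_heavy_light_chains_spec : Claim_equal_identify_heavy_light_chains := by
  intro chains pdb _hdom hpre
  unfold Spec_identify_heavy_light_chains identify_heavy_light_chains identify_heavy_light_chains_alt
  unfold Pre_identify_heavy_light_chains at hpre
  cases hsplit : PySem.Str.split? pdb "_" with
  | none => rfl
  | some parts =>
    rw [hsplit] at hpre
    dsimp only at hpre ⊢
    by_cases hlen : parts.length < 2
    · rw [if_pos hlen, if_pos hlen]
    · rw [if_neg hlen, if_neg hlen]
      have hpre0 := hpre.resolve_left hlen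
      have hpre' : ∀ c ∈ (PySem.List.pyGetD parts 1 "").toList,
          PySem.Dict.get? (⟨chains⟩ : PySem.Dict String String) (String.ofList [c]) ≠ some "" := by
        intro c hc
        have := List.all_eq_true.mp hpre0 c hc
        simpa using this
      have hpairs : ∀ q ∈ (PySem.List.pyGetD parts 1 "").toList.filterMap (fun c =>
          (PySem.Dict.get? (⟨chains⟩ : PySem.Dict String String) (String.ofList [c])).map
            (fun s => (String.ofList [c], s))), q.2 ≠ "" := by
        intro q hq
        rw [List.mem_filterMap] at hq
        obtain ⟨c, hc, hgc⟩ := hq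
        rw [Option.map_eq_some_iff] at hgc
        obtain ⟨s, hs, hqs⟩ := hgc
        have := hpre' c hc
        intro hq2
        apply this
        rw [hs]
        rw [← hqs] at hq2
        simpa [hq2]
      calc (PySem.List.pyGetD parts 1 "").toList.foldl (fun st chain_letter =>
            match PySem.Dict.get? (⟨chains⟩ : PySem.Dict String String) (String.ofList [chain_letter]) with
            | none => st
            | some seq =>
              let (heavy_id, heavy_seq, light_id, light_seq) := st
              if heavy_seq = "" ∨ PySem.Str.len heavy_seq < PySem.Str.len seq then
                if heavy_seq = "" then
                  (String.ofList [chain_letter], seq, light_id, light_seq)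
                else
                  (String.ofList [chain_letter], seq, heavy_id, heavy_seq)
              else if light_seq = "" ∨ PySem.Str.len light_seq < PySem.Str.len seq then
                (heavy_id, heavy_seq, String.ofList [chain_letter], seq)
              else st) ("", "", "", "")
          = ((PySem.List.pyGetD parts 1 "").toList.filterMap (fun c =>
              (PySem.Dict.get? (⟨chains⟩ : PySem.Dict String String) (String.ofList [c])).map
                (fun s => (String.ofList [c], s)))).foldl pvStepA ("", "", "", "") := by
            rw [List.foldl_filterMap]
            apply PySem.List.foldl_congr_mem
            intro st c _
            cases PySem.Dict.get? (⟨chains⟩ : PySem.Dict String String) (String.ofList [c]) <;> rfl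
        _ = pvPack (PySem.List.sorted _ (fun p => PySem.Str.len p.2) true) :=
            pvFold_eq_pack_sorted _ hpairs
        _ = _ := by rw [pvPack_eq_getD]
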